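-- pv_equiv track=rewrite | github.com/chelxten/mscdissertation | pages/2_tour_plan.py | reorder_medium_intensity
-- ===== SOURCE A (Python) =====
-- zones = {
--     "thrill": ["Roller Coaster", "Drop Tower", "Haunted Mine Train", "Spinning Vortex", "Freefall Cannon"],
--     "water": ["Water Slide", "Lazy River", "Log Flume", "Splash Battle", "Wave Pool"],
--     "family": ["Bumper Cars", "Mini Ferris Wheel", "Animal Safari Ride", "Ball Pit Dome", "Train Adventure"],
--     "entertainment": ["Live Stage", "Street Parade", "Magic Show", "Circus Tent", "Musical Fountain"],
--     "food": ["Food Court", "Snack Bar", "Ice Cream Kiosk", "Pizza Plaza", "Smoothie Station"],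
--     "shopping": ["Souvenir Shop", "Candy Store", "Photo Booth", "Gift Emporium", "Toy World"],
--     "relaxation": ["Relaxation Garden", "Shaded Benches", "Quiet Lake View", "Zen Courtyard", "Sky Deck"]
-- }
--
-- zone_intensity = {
--     "thrill": 0.95,         # High energy demand (e.g. roller coasters)
--     "water": 0.75,          # Swimming or flume-based attractions
--     "family": 0.55,         # Interactive but moderate exertion
--     "entertainment": 0.35,  # Low exertion, seated shows
--     "food": 0.15,           # Resting and eating
--     "shopping": 0.25,       # Low walking activity
--     "relaxation": 0.1       # Passive resting (benches, gardens)
-- }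
--
-- def reorder_medium_intensity(route):
--     medium_stops = []
--     other_stops = []
--
--     for stop in route:
--         zone = next((z for z, a in zones.items() if stop in a), None)
--         if zone is None:
--             other_stops.append(stop)
--             continue
--
--         intensity = zone_intensity.get(zone, 0)
--         if 0.3 <= intensity <= 0.7:
--             medium_stops.append(stop)
--         else:
--             other_stops.append(stop)
--
--     # Alternate medium with others
--     reordered = []
--     m_idx = 0
--     for i, stop in enumerate(other_stops):
--         reordered.append(stop)
--         if i % 2 == 1 and m_idx < len(medium_stops):
--             reordered.append(medium_stops[m_idx])
--             m_idx += 1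
--     reordered += medium_stops[m_idx:]
--     return reordered
-- ===== SOURCE B (Python) =====
-- zones = {
--     "thrill": ["Roller Coaster", "Drop Tower", "Haunted Mine Train", "Spinning Vortex", "Freefall Cannon"],
--     "water": ["Water Slide", "Lazy River", "Log Flume", "Splash Battle", "Wave Pool"],
--     "family": ["Bumper Cars", "Mini Ferris Wheel", "Animal Safari Ride", "Ball Pit Dome", "Train Adventure"],
--     "entertainment": ["Live Stage", "Street Parade", "Magic Show", "Circus Tent", "Musical Fountain"],
--     "food": ["Food Court", "Snack Bar", "Ice Cream Kiosk", "Pizza Plaza", "Smoothie Station"],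
--     "shopping": ["Souvenir Shop", "Candy Store", "Photo Booth", "Gift Emporium", "Toy World"],
--     "relaxation": ["Relaxation Garden", "Shaded Benches", "Quiet Lake View", "Zen Courtyard", "Sky Deck"]
-- }
--
-- zone_intensity = {
--     "thrill": 0.95,
--     "water": 0.75,
--     "family": 0.55,
--     "entertainment": 0.35,
--     "food": 0.15,
--     "shopping": 0.25,
--     "relaxation": 0.1
-- }
--
-- # attraction -> intensity of its zone, built once; unknown stops get 0 (never medium)
-- _INTENSITY = {a: zone_intensity.get(z, 0) for z, attrs in zones.items() for a in attrs}
--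
-- def reorder_medium_intensity(route):
--     mediums, others = [], []
--     for s in route:
--         (mediums if 0.3 <= _INTENSITY.get(s, 0) <= 0.7 else others).append(s)
--     # consume the two worklists destructively, in triples (two others, one medium),
--     # popping from the reversed lists so each pop is O(1); leftovers keep their order
--     others.reverse()
--     mediums.reverse()
--     out = []
--     while len(others) >= 2 and mediums:
--         out.append(others.pop())
--         out.append(others.pop())
--         out.append(mediums.pop())
--     out.extend(reversed(others))
--     out.extend(reversed(mediums))
--     return out
-- ===== Notes on version B (the rewrite author's own statement) =====
-- stated objective: faster
-- what changed: Classification goes through a precomputed attraction-to-intensity dict (one lookup per stop) instead of scanning every zone's attraction list per stop, and A's enumerate/parity/m_idx interleaving loop is replaced by a destructive worklist loop that reverses both lists and pops them in triples (two others, one medium) while both suffice, appending the leftovers afterwards.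
import Mathlib
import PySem

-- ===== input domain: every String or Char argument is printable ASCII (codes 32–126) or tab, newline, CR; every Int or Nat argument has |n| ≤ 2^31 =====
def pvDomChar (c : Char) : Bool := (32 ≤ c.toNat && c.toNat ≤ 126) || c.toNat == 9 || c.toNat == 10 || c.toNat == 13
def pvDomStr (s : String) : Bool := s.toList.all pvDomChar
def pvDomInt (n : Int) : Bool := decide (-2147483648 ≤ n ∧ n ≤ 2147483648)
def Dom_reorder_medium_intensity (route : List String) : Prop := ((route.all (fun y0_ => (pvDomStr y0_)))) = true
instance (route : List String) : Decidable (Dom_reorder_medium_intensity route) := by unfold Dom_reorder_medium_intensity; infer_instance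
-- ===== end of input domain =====

-- B classifies each stop through a precomputed attraction→intensity dict (one lookup instead of
-- scanning every zone's list per stop) and replaces A's enumerate/parity/m_idx interleaving loop
-- with a destructive worklist loop: both lists are reversed and consumed by O(1) pops in triples
-- (two others, one medium) while both suffice, leftovers appended afterwards.
-- Intensities (Python floats) are represented as Int hundredths; the comparisons
-- 0.3 <= intensity <= 0.7 are exact on this fixed table of well-separated values.

-- ===== PORT A =====
def pvZones : List (String × List String) :=
  [("thrill", ["Roller Coaster", "Drop Tower", "Haunted Mine Train", "Spinning Vortex", "Freefall Cannon"]),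
   ("water", ["Water Slide", "Lazy River", "Log Flume", "Splash Battle", "Wave Pool"]),
   ("family", ["Bumper Cars", "Mini Ferris Wheel", "Animal Safari Ride", "Ball Pit Dome", "Train Adventure"]),
   ("entertainment", ["Live Stage", "Street Parade", "Magic Show", "Circus Tent", "Musical Fountain"]),
   ("food", ["Food Court", "Snack Bar", "Ice Cream Kiosk", "Pizza Plaza", "Smoothie Station"]),
   ("shopping", ["Souvenir Shop", "Candy Store", "Photo Booth", "Gift Emporium", "Toy World"]),
   ("relaxation", ["Relaxation Garden", "Shaded Benches", "Quiet Lake View", "Zen Courtyard", "Sky Deck"])]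

def pvZoneIntensity : PySem.Dict String Int :=
  ⟨[("thrill", 95), ("water", 75), ("family", 55), ("entertainment", 35),
    ("food", 15), ("shopping", 25), ("relaxation", 10)]⟩

-- one iteration of A's classification loop: zone = next((z for z, a in zones.items() if stop in a), None),
-- then the 0.3 <= intensity <= 0.7 test decides which list the stop is appended to
def pvAStep (acc : List String × List String) (stop : String) : List String × List String :=
  match pvZones.find? (fun za => za.2.contains stop) with
  | none => (acc.1, acc.2 ++ [stop])
  | some za =>
    let intensity := PySem.Dict.getD pvZoneIntensity za.1 0
    if 30 ≤ intensity ∧ intensity ≤ 70 then (acc.1 ++ [stop], acc.2)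
    else (acc.1, acc.2 ++ [stop])

-- one iteration of A's loop over enumerate(other_stops) with state (reordered, m_idx)
def pvIStep (ms : List String) (st : List String × Int) (is_ : Int × String) : List String × Int :=
  let r := st.1 ++ [is_.2]
  if PySem.Int.mod is_.1 2 == 1 && st.2 < (ms.length : Int)
  then (r ++ [PySem.List.pyGetD ms st.2 ""], st.2 + 1)
  else (r, st.2)

def reorder_medium_intensity (route : List String) : List String :=
  let p := route.foldl pvAStep ([], [])
  let q := (PySem.List.enumerate p.2 0).foldl (pvIStep p.1) ([], 0)
  q.1 ++ PySem.List.slice p.1 (some q.2) none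

-- ===== PORT B =====
-- _INTENSITY: B's dict comprehension over zones, attraction -> its zone's intensity
def pvIntensity : PySem.Dict String Int :=
  pvZones.foldl
    (fun d za => za.2.foldl (fun d a => d.insert a (PySem.Dict.getD pvZoneIntensity za.1 0)) d)
    ⟨[]⟩

-- one iteration of B's classification loop: (mediums if 0.3 <= _INTENSITY.get(s,0) <= 0.7 else others).append(s)
def pvBStep (acc : List String × List String) (s : String) : List String × List String :=
  if 30 ≤ PySem.Dict.getD pvIntensity s 0 ∧ PySem.Dict.getD pvIntensity s 0 ≤ 70
  then (acc.1 ++ [s], acc.2)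
  else (acc.1, acc.2 ++ [s])

-- B's while loop: pop two others and one medium (from the ends of the reversed lists) while
-- both suffice; then out.extend(reversed(others)); out.extend(reversed(mediums))
def pvPopLoop (out ro rm : List String) : List String :=
  if 2 ≤ ro.length ∧ rm ≠ [] then
    pvPopLoop (out ++ [ro.getLast?.getD "", ro.dropLast.getLast?.getD "", rm.getLast?.getD ""])
      ro.dropLast.dropLast rm.dropLast
  else out ++ ro.reverse ++ rm.reverse
termination_by ro.length
decreasing_by
  simp [List.length_dropLast]; omega

def reorder_medium_intensity_alt (route : List String) : List String :=
  let p := route.foldl pvBStep ([], [])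
  pvPopLoop [] p.2.reverse p.1.reverse

-- ===== PRECONDITION & SPEC =====
def Spec_reorder_medium_intensity (route : List String) (out : List String) : Prop := out = reorder_medium_intensity_alt route
instance (route : List String) (out : List String) : Decidable (Spec_reorder_medium_intensity route out) := by unfold Spec_reorder_medium_intensity; infer_instance

-- ===== CLAIM (what is proved, stated in full; the proofs are below) =====
def Claim_equal_reorder_medium_intensity : Prop := ∀ (route : List String), Dom_reorder_medium_intensity route → Spec_reorder_medium_intensity route (reorder_medium_intensity route)

-- ===== LEMMAS AND PROOFS =====

-- the common interleaving: two others, then one medium, while both suffice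
def pvMerge : List String → List String → List String
  | o1 :: o2 :: os, m :: ms => o1 :: o2 :: m :: pvMerge os ms
  | os, ms => os ++ ms

-- A's decision "stop is medium" as a Bool
def pvAMed (s : String) : Bool :=
  match pvZones.find? (fun za => za.2.contains s) with
  | none => false
  | some za => decide (30 ≤ PySem.Dict.getD pvZoneIntensity za.1 0 ∧ PySem.Dict.getD pvZoneIntensity za.1 0 ≤ 70)

def pvBMed (s : String) : Bool :=
  decide (30 ≤ PySem.Dict.getD pvIntensity s 0 ∧ PySem.Dict.getD pvIntensity s 0 ≤ 70)

set_option maxRecDepth 40000 in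
-- the two classifiers agree on every string: case on each of the 35 known attraction names,
-- and for any other string both sides see no zone / intensity 0
lemma pv_med_eq (s : String) : pvAMed s = pvBMed s := by
  by_cases h0 : s = "Roller Coaster"
  · subst h0; decide
  by_cases h1 : s = "Drop Tower"
  · subst h1; decide
  by_cases h2 : s = "Haunted Mine Train"
  · subst h2; decide
  by_cases h3 : s = "Spinning Vortex"
  · subst h3; decide
  by_cases h4 : s = "Freefall Cannon"
  · subst h4; decide
  by_cases h5 : s = "Water Slide"
  · subst h5; decide
  by_cases h6 : s = "Lazy River"
  · subst h6; decide
  by_cases h7 : s = "Log Flume"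
  · subst h7; decide
  by_cases h8 : s = "Splash Battle"
  · subst h8; decide
  by_cases h9 : s = "Wave Pool"
  · subst h9; decide
  by_cases h10 : s = "Bumper Cars"
  · subst h10; decide
  by_cases h11 : s = "Mini Ferris Wheel"
  · subst h11; decide
  by_cases h12 : s = "Animal Safari Ride"
  · subst h12; decide
  by_cases h13 : s = "Ball Pit Dome"
  · subst h13; decide
  by_cases h14 : s = "Train Adventure"
  · subst h14; decide
  by_cases h15 : s = "Live Stage"
  · subst h15; decide
  by_cases h16 : s = "Street Parade"
  · subst h16; decide
  by_cases h17 : s = "Magic Show"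
  · subst h17; decide
  by_cases h18 : s = "Circus Tent"
  · subst h18; decide
  by_cases h19 : s = "Musical Fountain"
  · subst h19; decide
  by_cases h20 : s = "Food Court"
  · subst h20; decide
  by_cases h21 : s = "Snack Bar"
  · subst h21; decide
  by_cases h22 : s = "Ice Cream Kiosk"
  · subst h22; decide
  by_cases h23 : s = "Pizza Plaza"
  · subst h23; decide
  by_cases h24 : s = "Smoothie Station"
  · subst h24; decide
  by_cases h25 : s = "Souvenir Shop"
  · subst h25; decide
  by_cases h26 : s = "Candy Store"
  · subst h26; decide
  by_cases h27 : s = "Photo Booth"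
  · subst h27; decide
  by_cases h28 : s = "Gift Emporium"
  · subst h28; decide
  by_cases h29 : s = "Toy World"
  · subst h29; decide
  by_cases h30 : s = "Relaxation Garden"
  · subst h30; decide
  by_cases h31 : s = "Shaded Benches"
  · subst h31; decide
  by_cases h32 : s = "Quiet Lake View"
  · subst h32; decide
  by_cases h33 : s = "Zen Courtyard"
  · subst h33; decide
  by_cases h34 : s = "Sky Deck"
  · subst h34; decide
  simp [pvAMed, pvBMed, pvIntensity, pvZones, pvZoneIntensity, List.find?,
        PySem.Dict.getD, PySem.Dict.get?, PySem.Dict.insert, beq_iff_eq,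
        h0, h1, h2, h3, h4, h5, h6, h7, h8, h9, h10, h11, h12, h13, h14, h15, h16, h17, h18, h19,
        h20, h21, h22, h23, h24, h25, h26, h27, h28, h29, h30, h31, h32, h33, h34,
        beq_false_of_ne (Ne.symm h0), beq_false_of_ne (Ne.symm h1), beq_false_of_ne (Ne.symm h2), beq_false_of_ne (Ne.symm h3), beq_false_of_ne (Ne.symm h4), beq_false_of_ne (Ne.symm h5), beq_false_of_ne (Ne.symm h6), beq_false_of_ne (Ne.symm h7), beq_false_of_ne (Ne.symm h8), beq_false_of_ne (Ne.symm h9), beq_false_of_ne (Ne.symm h10), beq_false_of_ne (Ne.symm h11), beq_false_of_ne (Ne.symm h12), beq_false_of_ne (Ne.symm h13), beq_false_of_ne (Ne.symm h14), beq_false_of_ne (Ne.symm h15), beq_false_of_ne (Ne.symm h16), beq_false_of_ne (Ne.symm h17), beq_false_of_ne (Ne.symm h18), beq_false_of_ne (Ne.symm h19), beq_false_of_ne (Ne.symm h20), beq_false_of_ne (Ne.symm h21), beq_false_of_ne (Ne.symm h22), beq_false_of_ne (Ne.symm h23), beq_false_of_ne (Ne.symm h24), beq_false_of_ne (Ne.symm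 h25), beq_false_of_ne (Ne.symm h26), beq_false_of_ne (Ne.symm h27), beq_false_of_ne (Ne.symm h28), beq_false_of_ne (Ne.symm h29), beq_false_of_ne (Ne.symm h30), beq_false_of_ne (Ne.symm h31), beq_false_of_ne (Ne.symm h32), beq_false_of_ne (Ne.symm h33), beq_false_of_ne (Ne.symm h34)]

-- the two classification steps agree
lemma pvStep_eq : pvAStep = pvBStep := by
  funext acc s
  have h := pv_med_eq s
  unfold pvAMed pvBMed at h
  unfold pvAStep pvBStep
  cases hf : pvZones.find? (fun za => za.2.contains s) with
  | none =>
    rw [hf] at h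
    have hc : ¬ (30 ≤ PySem.Dict.getD pvIntensity s 0 ∧ PySem.Dict.getD pvIntensity s 0 ≤ 70) :=
      of_decide_eq_false h.symm
    simp [hc]
  | some za =>
    rw [hf] at h
    have hiff := decide_eq_decide.mp h
    simp only [hiff]

-- A's interleaving fold followed by the final slice, as a function
def pvRun (ms : List String) (s0 : List String × Int) (es : List (Int × String)) : List String :=
  let q := es.foldl (pvIStep ms) s0
  q.1 ++ PySem.List.slice ms (some q.2) none

-- A's interleaving loop, started at any even index with m_idx = j, is pvMerge of the remaining lists
lemma pv_interleave (ms : List String) :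
    ∀ (os : List String) (n : Nat) (acc : List String) (j : Nat), j ≤ ms.length →
      pvRun ms (acc, (j : Int)) (PySem.List.enumerate os ((2 * n : Nat) : Int)) =
        acc ++ pvMerge os (ms.drop j)
  | [], n, acc, j, hj => by
      simp [pvRun, pvMerge, PySem.List.enumerate, PySem.List.slice_from_natCast]
  | [o], n, acc, j, hj => by
      simp [pvRun, pvMerge, PySem.List.enumerate, pvIStep,
            PySem.List.slice_from_natCast]
  | o1 :: o2 :: os', n, acc, j, hj => by
      have e : PySem.List.enumerate (o1 :: o2 :: os') ((2 * n : Nat) : Int) =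
          (((2 * n : Nat) : Int), o1) :: ((((2 * n : Nat) : Int) + 1), o2) ::
            PySem.List.enumerate os' ((2 * (n + 1) : Nat) : Int) := by
        have hc2 : ((2 * (n + 1) : Nat) : Int) = ((2 * n : Nat) : Int) + 1 + 1 := by push_cast; ring
        simp [PySem.List.enumerate, hc2]
      have s1 : pvIStep ms (acc, (j : Int)) (((2 * n : Nat) : Int), o1) = (acc ++ [o1], (j : Int)) := by
        simp [pvIStep]
      by_cases hjl : j < ms.length
      · have hdrop : ms.drop j = ms[j] :: ms.drop (j + 1) := List.drop_eq_getElem_cons hjl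
        have s2 : pvIStep ms (acc ++ [o1], (j : Int)) ((((2 * n : Nat) : Int) + 1), o2) =
            (acc ++ [o1] ++ [o2] ++ [ms[j]], ((j + 1 : Nat) : Int)) := by
          have hg : PySem.List.pyGetD ms (j : Int) "" = ms[j] := by
            rw [PySem.List.pyGetD_natCast]; exact List.getD_eq_getElem _ _ hjl
          simp [pvIStep, hjl, hg]
        have ih := pv_interleave ms os' (n + 1) (acc ++ [o1] ++ [o2] ++ [ms[j]]) (j + 1) (by omega)
        simp only [pvRun, e, List.foldl_cons, s1, s2] at ih ⊢
        rw [hdrop]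
        simpa [pvMerge, List.append_assoc] using ih
      · have hje : j = ms.length := by omega
        have hdrop : ms.drop j = [] := by simp [hje]
        have s2 : pvIStep ms (acc ++ [o1], (j : Int)) ((((2 * n : Nat) : Int) + 1), o2) =
            (acc ++ [o1] ++ [o2], (j : Int)) := by
          have hnl : ¬ ((j : Int) < (ms.length : Int)) := by exact_mod_cast hjl
          simp [pvIStep, hnl]
        have ih := pv_interleave ms os' (n + 1) (acc ++ [o1] ++ [o2]) j hj
        simp only [pvRun, e, List.foldl_cons, s1, s2] at ih ⊢
        rw [hdrop] at ih ⊢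
        simpa [pvMerge, List.append_assoc] using ih

-- B's pop loop on the reversed lists is pvMerge of the originals
lemma pv_poploop :
    ∀ (os ms out : List String), pvPopLoop out os.reverse ms.reverse = out ++ pvMerge os ms
  | o1 :: o2 :: os', m :: ms', out => by
      rw [pvPopLoop]
      have hguard : 2 ≤ (o1 :: o2 :: os').reverse.length ∧ (m :: ms').reverse ≠ [] := by
        constructor
        · simp
        · simp
      rw [if_pos hguard]
      have e1 : (o1 :: o2 :: os').reverse.getLast?.getD "" = o1 := by
        simp [List.getLast?_reverse]
      have ed1 : (o1 :: o2 :: os').reverse.dropLast = (o2 :: os').reverse := by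
        rw [show (o1 :: o2 :: os') = [o1] ++ (o2 :: os') from rfl]
        simp [List.dropLast_append_of_ne_nil]
      have e2 : (o2 :: os').reverse.getLast?.getD "" = o2 := by
        simp [List.getLast?_reverse]
      have ed2 : (o2 :: os').reverse.dropLast = os'.reverse := by
        rw [show (o2 :: os') = [o2] ++ os' from rfl]
        by_cases h : os' = []
        · subst h; simp
        · simp [List.dropLast_append_of_ne_nil]
      have e3 : (m :: ms').reverse.getLast?.getD "" = m := by
        simp [List.getLast?_reverse]
      have ed3 : (m :: ms').reverse.dropLast = ms'.reverse := by
        rw [show (m :: ms') = [m] ++ ms' from rfl]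
        by_cases h : ms' = []
        · subst h; simp
        · simp [List.dropLast_append_of_ne_nil]
      rw [e1, ed1, e2, ed2, e3, ed3, pv_poploop os' ms' _]
      simp [pvMerge]
  | [], ms, out => by
      rw [pvPopLoop]
      have : ¬ (2 ≤ ([] : List String).reverse.length ∧ ms.reverse ≠ []) := by simp
      rw [if_neg this]
      simp [pvMerge]
  | [o], ms, out => by
      rw [pvPopLoop]
      have : ¬ (2 ≤ [o].reverse.length ∧ ms.reverse ≠ []) := by simp
      rw [if_neg this]
      cases ms <;> simp [pvMerge]
  | o1 :: o2 :: os', [], out => by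
      rw [pvPopLoop]
      have : ¬ (2 ≤ (o1 :: o2 :: os').reverse.length ∧ ([] : List String).reverse ≠ []) := by simp
      rw [if_neg this]
      simp [pvMerge]

-- ===== VERDICT (by name: the statement is the Claim_ definition above) =====
theorem reorder_medium_intensity_spec : Claim_equal_reorder_medium_intensity := by
  intro route _
  unfold Spec_reorder_medium_intensity reorder_medium_intensity reorder_medium_intensity_alt
  rw [pvStep_eq]
  have h := pv_interleave (route.foldl pvBStep ([], [])).1 (route.foldl pvBStep ([], [])).2 0 [] 0
    (by omega)
  norm_num [pvRun] at h
  rw [h, pv_poploop]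
  simp
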